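-- pv_equiv track=rewrite | github.com/aravaca/electric-multiple-unit-protection-system | tasc/static/helper/stair.py | is_stair_pattern
-- ===== SOURCE A (Python) =====
-- from typing import Optional, List, Tuple
--
-- def remove_negative_values(notches: List[int]) -> List[int]:
--     """마지막 음수 값 뒤에 있는 모든 수 반환, 음수가 없으면 원본 리스트 반환"""
--     # 역순으로 탐색해서 마지막 음수 값을 찾음
--     for i in range(len(notches) - 1, -1, -1):
--         if notches[i] < 0:
--             # 마지막 음수 이후의 모든 값들 반환
--             return notches[i+1:]
--     # 음수가 없으면 원본 리스트 반환
--     return notches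
--
-- def is_stair_pattern(notches: List[int]) -> bool:
--
--         notches = remove_negative_values(notches)
--
--         if len(notches) < 5:
--             return False
--
--         peak_reached = False
--         prev = notches[0]
--
--         for cur in notches[1:]:
--             if not peak_reached:
--                 if cur < prev:  # 내려가기 시작하면 피크 도달
--                     peak_reached = True
--             else:
--                 if cur > prev:  # 피크 이후 다시 올라가면 실패
--                     return False
--             prev = cur
--
--         # 마지막은 1, 2로 끝나야 함
--         if notches[-1] not in [1, 2]:
--             return False
--
--         return True
-- ===== SOURCE B (Python) =====
-- from typing import List
--
-- def remove_negative_values(notches: List[int]) -> List[int]: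
--     for i in range(len(notches) - 1, -1, -1):
--         if notches[i] < 0:
--             return notches[i+1:]
--     return notches
--
-- def is_stair_pattern(notches: List[int]) -> bool:
--     notches = remove_negative_values(notches)
--     if len(notches) < 5:
--         return False
--     # Global characterization instead of a sequential state machine:
--     # collect the positions of all rising steps and all falling steps;
--     # the sequence is a stair iff the last rise precedes the first fall.
--     diffs = [b - a for a, b in zip(notches, notches[1:])]
--     rises = [i for i, d in enumerate(diffs) if d > 0]
--     falls = [i for i, d in enumerate(diffs) if d < 0]
--     if rises and falls and rises[-1] > falls[0]:
--         return False
--     return notches[-1] in (1, 2)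
-- ===== Notes on version B (the rewrite author's own statement) =====
-- stated objective: alternative
-- what changed: A's flag-driven single-pass state machine is replaced by a global characterization: collect the index lists of all rising and all falling steps and accept iff the last rise precedes the first fall (rises[-1] <= falls[0]); the suffix extraction and the length/last-element guards are kept.
import Mathlib
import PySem

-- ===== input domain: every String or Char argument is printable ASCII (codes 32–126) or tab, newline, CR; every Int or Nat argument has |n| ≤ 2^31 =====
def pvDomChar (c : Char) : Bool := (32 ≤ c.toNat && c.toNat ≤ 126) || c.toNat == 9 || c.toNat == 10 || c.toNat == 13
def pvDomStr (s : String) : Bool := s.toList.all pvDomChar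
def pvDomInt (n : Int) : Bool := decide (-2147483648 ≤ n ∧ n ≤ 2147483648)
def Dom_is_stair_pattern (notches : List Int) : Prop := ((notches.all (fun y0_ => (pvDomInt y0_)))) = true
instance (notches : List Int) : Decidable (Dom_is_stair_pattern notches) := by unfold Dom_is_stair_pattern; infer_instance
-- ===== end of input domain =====

-- One honest line: B replaces A's flag-driven single-pass state machine by a global
-- characterization — collect all rising-step and falling-step indices and accept iff
-- the last rise precedes the first fall (same cost, different algorithm).


-- ===== PORT A =====
-- backward index loop of remove_negative_values: counter k+1 means current index i = k
-- (index is always in range, so the .getD 0 of pyGet? is exact)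
def removeNegGo (notches : List Int) : Nat → List Int
  | 0 => notches
  | k+1 =>
    if (PySem.List.pyGet? notches (Int.ofNat k)).getD 0 < 0 then
      notches.drop (k+1)          -- notches[i+1:] with i+1 ≥ 0 is drop (i+1)
    else removeNegGo notches k

-- shared same-module helper of Source A and Source B
def remove_negative_values (notches : List Int) : List Int :=
  removeNegGo notches notches.length

-- A's flag-driven pass: prev/peak_reached state over notches[1:]
def stairLoop (prev : Int) (peak : Bool) : List Int → Bool
  | [] => true
  | cur :: rest =>
    if peak then
      if cur > prev then false else stairLoop cur peak rest
    else
      stairLoop cur (if cur < prev then true else peak) rest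

def is_stair_pattern (notches : List Int) : Bool :=
  let l := remove_negative_values notches
  if l.length < 5 then false
  else
    match l with
    | [] => false                 -- unreachable: l.length ≥ 5
    | p0 :: rest =>
      if stairLoop p0 false rest then
        ((PySem.List.pyGet? l (-1)).getD 0 == 1) || ((PySem.List.pyGet? l (-1)).getD 0 == 2)
      else false

-- ===== PORT B =====
-- Source B's comprehensions `[i for i, d in enumerate(diffs) if d > 0]` (resp. `d < 0`),
-- with the start parameter kept general for the proofs (Source B calls it with start 0)
def risesOf (d : List Int) (s : Int) : List Int :=
  ((PySem.List.enumerate d s).filter (fun p => decide (0 < p.2))).map Prod.fst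

def fallsOf (d : List Int) (s : Int) : List Int :=
  ((PySem.List.enumerate d s).filter (fun p => decide (p.2 < 0))).map Prod.fst

def is_stair_pattern_alt (notches : List Int) : Bool :=
  let l := remove_negative_values notches
  if l.length < 5 then false
  else
    let diffs := List.zipWith (fun a b => b - a) l l.tail   -- zip(notches, notches[1:])
    let rises := risesOf diffs 0
    let falls := fallsOf diffs 0
    -- `rises and falls and rises[-1] > falls[0]`: rises[-1]/falls[0] are guarded by
    -- nonemptiness, so getLast?/head? are exact here
    let bad := match rises.getLast?, falls.head? with
      | some M, some m => decide (m < M)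
      | _, _ => false
    if bad then false
    else ((PySem.List.pyGet? l (-1)).getD 0 == 1) || ((PySem.List.pyGet? l (-1)).getD 0 == 2)

-- ===== PRECONDITION & SPEC =====
def Spec_is_stair_pattern (notches : List Int) (out : Bool) : Prop := out = is_stair_pattern_alt notches
instance (notches : List Int) (out : Bool) : Decidable (Spec_is_stair_pattern notches out) := by unfold Spec_is_stair_pattern; infer_instance

-- ===== CLAIM (what is proved, stated in full; the proofs are below) =====
def Claim_equal_is_stair_pattern : Prop := ∀ (notches : List Int), Dom_is_stair_pattern notches → Spec_is_stair_pattern notches (is_stair_pattern notches)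

-- ===== LEMMAS AND PROOFS =====

-- the non-negative-prefix view of the diff list used to bridge the two programs
def dropRise : List Int → List Int
  | [] => []
  | d :: rest => if d ≥ 0 then dropRise rest else d :: rest

-- after the peak, A's pass succeeds iff no consecutive difference is positive
theorem stairLoop_true_eq (rest : List Int) : ∀ prev : Int,
    stairLoop prev true rest
      = !(List.zipWith (fun a b => b - a) (prev :: rest) rest).any (fun d => decide (0 < d)) := by
  induction rest with
  | nil => intro prev; simp [stairLoop]
  | cons c r ih =>
    intro prev
    simp only [stairLoop, List.zipWith, List.any_cons]
    by_cases h : c > prev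
    · simp [h]
    · simp [h, ih]

-- A's whole pass equals the drop-rising-diffs-then-check view of the diff list
theorem stairLoop_false_eq (rest : List Int) : ∀ prev : Int,
    stairLoop prev false rest
      = !(dropRise (List.zipWith (fun a b => b - a) (prev :: rest) rest)).any (fun d => decide (0 < d)) := by
  induction rest with
  | nil => intro prev; simp [stairLoop, dropRise]
  | cons c r ih =>
    intro prev
    simp only [stairLoop, List.zipWith, dropRise]
    by_cases h : c < prev
    · simp only [if_pos h, if_neg (show ¬ c - prev ≥ 0 by omega), List.any_cons]
      simp [stairLoop_true_eq]
      intro _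
      omega
    · simp only [if_neg h, if_pos (show c - prev ≥ 0 by omega)]
      exact ih c

-- every index collected from an enumeration starting at s is ≥ s
theorem mem_enumFilter_ge (d : List Int) (s : Int) (p : Int × Int → Bool) (m : Int)
    (h : m ∈ ((PySem.List.enumerate d s).filter p).map Prod.fst) : s ≤ m := by
  obtain ⟨pair, hp, rfl⟩ := List.mem_map.1 h
  have hmem := List.mem_of_mem_filter hp
  rw [PySem.List.mem_enumerate_iff] at hmem
  obtain ⟨k, _, rfl⟩ := hmem
  simp

-- the rise-index list is empty iff the diff list has no positive entry
theorem risesOf_eq_nil_iff (d : List Int) : ∀ s : Int,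
    (risesOf d s = [] ↔ d.any (fun x => decide (0 < x)) = false) := by
  induction d with
  | nil => intro s; simp [risesOf, PySem.List.enumerate_nil]
  | cons x r ih =>
    intro s
    simp only [risesOf, PySem.List.enumerate_cons, List.filter_cons, List.any_cons] at *
    by_cases hx : (0 : Int) < x
    · simp [hx]
    · simp [hx, ih (s + 1)]

def badOf (d : List Int) (s : Int) : Bool :=
  match (risesOf d s).getLast?, (fallsOf d s).head? with
  | some M, some m => decide (m < M)
  | _, _ => false

theorem fallsOf_cons (x : Int) (r : List Int) (s : Int) :
    fallsOf (x :: r) s = (if x < 0 then [s] else []) ++ fallsOf r (s + 1) := by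
  simp only [fallsOf, PySem.List.enumerate_cons, List.filter_cons]
  by_cases hx : x < 0 <;> simp [hx]

theorem risesOf_cons (x : Int) (r : List Int) (s : Int) :
    risesOf (x :: r) s = (if 0 < x then [s] else []) ++ risesOf r (s + 1) := by
  simp only [risesOf, PySem.List.enumerate_cons, List.filter_cons]
  by_cases hx : 0 < x <;> simp [hx]

-- B's last-rise-after-first-fall test equals the drop-rising-diffs view
theorem badOf_eq (d : List Int) : ∀ s : Int,
    badOf d s = (dropRise d).any (fun x => decide (0 < x)) := by
  induction d with
  | nil => intro s; simp [badOf, risesOf, fallsOf, PySem.List.enumerate_nil, dropRise]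
  | cons x r ih =>
    intro s
    rcases lt_trichotomy x 0 with hx | hx | hx
    · -- x < 0 : x becomes the first fall; bad iff some rise exists in r
      have h1 : risesOf (x :: r) s = risesOf r (s + 1) := by
        rw [risesOf_cons]; simp [show ¬ (0:Int) < x by omega]
      have h2 : fallsOf (x :: r) s = s :: fallsOf r (s + 1) := by
        rw [fallsOf_cons]; simp [hx]
      have hdr : dropRise (x :: r) = x :: r := by
        simp [dropRise, show ¬ x ≥ 0 by omega]
      rw [hdr]
      simp only [badOf, h1, h2, List.head?_cons, List.any_cons,
        show decide ((0:Int) < x) = false by simp; omega, Bool.false_or]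
      cases hR : (risesOf r (s + 1)).getLast? with
      | none =>
        have : risesOf r (s + 1) = [] := List.getLast?_eq_none_iff.1 hR
        have := (risesOf_eq_nil_iff r (s + 1)).1 this
        simp [this]
      | some M =>
        have hMmem : M ∈ risesOf r (s + 1) := List.mem_of_getLast? hR
        have hMs : s + 1 ≤ M := mem_enumFilter_ge r (s + 1) _ M hMmem
        have hne : risesOf r (s + 1) ≠ [] := by
          intro h; rw [h] at hMmem; exact absurd hMmem (List.not_mem_nil)
        have : r.any (fun x => decide (0 < x)) = true := by
          by_contra h
          exact hne ((risesOf_eq_nil_iff r (s + 1)).2 (by simpa using h))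
        simp only [this]
        simp
        omega

    · -- x = 0 : no step; both index lists just shift
      subst hx
      have h1 : risesOf (0 :: r) s = risesOf r (s + 1) := by
        rw [risesOf_cons]; simp
      have h2 : fallsOf (0 :: r) s = fallsOf r (s + 1) := by
        rw [fallsOf_cons]; simp
      have hdr : dropRise ((0:Int) :: r) = dropRise r := by simp [dropRise]
      rw [hdr, ← ih (s + 1)]
      simp [badOf, h1, h2]
    · -- 0 < x : x is a rise at index s, smaller than every later index
      have h1 : risesOf (x :: r) s = s :: risesOf r (s + 1) := by
        rw [risesOf_cons]; simp [hx]
      have h2 : fallsOf (x :: r) s = fallsOf r (s + 1) := by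
        rw [fallsOf_cons]; simp [show ¬ x < 0 by omega]
      have hdr : dropRise (x :: r) = dropRise r := by
        simp [dropRise, show x ≥ 0 by omega]
      rw [hdr, ← ih (s + 1)]
      simp only [badOf, h1, h2]
      cases hF : (fallsOf r (s + 1)).head? with
      | none => cases (s :: risesOf r (s + 1)).getLast? <;> cases (risesOf r (s + 1)).getLast? <;> rfl
      | some m =>
        have hmmem : m ∈ fallsOf r (s + 1) := by
          cases hFl : fallsOf r (s + 1) with
          | nil => rw [hFl] at hF; simp at hF
          | cons a t => rw [hFl] at hF; simp at hF; subst hF; exact List.mem_cons_self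
        have hms : s + 1 ≤ m := mem_enumFilter_ge r (s + 1) _ m hmmem
        cases hR : risesOf r (s + 1) with
        | nil =>
          simp only [List.getLast?_singleton, List.getLast?_nil]
          simp; omega
        | cons a t =>
          rw [← hR]
          have hne : risesOf r (s + 1) ≠ [] := by rw [hR]; exact List.cons_ne_nil a t
          rw [show (s :: risesOf r (s + 1)).getLast? = (risesOf r (s + 1)).getLast? by
            cases hR2 : risesOf r (s + 1) with
            | nil => exact absurd hR2 hne
            | cons b u => simp [List.getLast?_cons_cons]]

-- ===== VERDICT (by name: the statement is the Claim_ definition above) =====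
theorem is_stair_pattern_spec : Claim_equal_is_stair_pattern := by
  intro notches _
  unfold Spec_is_stair_pattern is_stair_pattern is_stair_pattern_alt
  cases h : remove_negative_values notches with
  | nil => simp
  | cons p0 rest =>
    simp only [List.tail_cons]
    by_cases h5 : (p0 :: rest).length < 5
    · rw [if_pos h5, if_pos h5]
    · rw [if_neg h5, if_neg h5, stairLoop_false_eq,
        ← badOf_eq (List.zipWith (fun a b => b - a) (p0 :: rest) rest) 0]
      have hB : (match (risesOf (List.zipWith (fun a b => b - a) (p0 :: rest) rest) 0).getLast?,
          (fallsOf (List.zipWith (fun a b => b - a) (p0 :: rest) rest) 0).head? with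
        | some M, some m => decide (m < M)
        | _, _ => false) = badOf (List.zipWith (fun a b => b - a) (p0 :: rest) rest) 0 := rfl
      simp only [hB]
      cases badOf (List.zipWith (fun a b => b - a) (p0 :: rest) rest) 0 <;> simp
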